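-- pv_equiv track=rewrite | github.com/eroge-69/PyToExe | python-files/version3.py | segment_diff
-- ===== SOURCE A (Python) =====
-- def segment_diff(diff):
--     sections = {"All": diff}
--     curr_section = "Misc"
--     section_lines = []
--
--     keyword_map = {
--         "Dead Code": ["eliminate", "unused", "dce"],
--         "Inlining": ["inline"],
--         "Constant Folding": ["fold", "constant"],
--         "Loop Optimizations": ["loop", "unroll", "ivopt"],
--         "Strength Reduction": ["strength", "reduction"],
--         "Reordering": ["reorder", "schedule"],
--     }
--
--     for line in diff:
--         matched = False
--         for section, keywords in keyword_map.items():
--             if any(kw in line.lower() for kw in keywords):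
--                 sections.setdefault(section, []).append(line)
--                 matched = True
--         if not matched:
--             sections.setdefault("Misc", []).append(line)
--     return sections
-- ===== SOURCE B (Python) =====
-- def segment_diff(diff):
--     keyword_map = {
--         "Dead Code": ["eliminate", "unused", "dce"],
--         "Inlining": ["inline"],
--         "Constant Folding": ["fold", "constant"],
--         "Loop Optimizations": ["loop", "unroll", "ivopt"],
--         "Strength Reduction": ["strength", "reduction"],
--         "Reordering": ["reorder", "schedule"],
--     }
--
--     def tags(line):
--         low = line.lower()
--         hits = [s for s, kws in keyword_map.items() if any(kw in low for kw in kws)]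
--         return hits or ["Misc"]
--
--     # tag every line once, take the keys in order of first appearance,
--     # then fill each bucket with an independent filter scan
--     tagged = [(line, tags(line)) for line in diff]
--     order = dict.fromkeys(t for _, ts in tagged for t in ts)
--     sections = {"All": diff}
--     for s in order:
--         sections[s] = [line for line, ts in tagged if s in ts]
--     return sections
-- ===== Notes on version B (the rewrite author's own statement) =====
-- stated objective: alternative
-- what changed: A fans each line out into section buckets in a single pass with setdefault-append; B tags every line once, computes the key order via dict.fromkeys over the tags, and then fills each bucket with an independent filter scan over the tagged lines.
import Mathlib
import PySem

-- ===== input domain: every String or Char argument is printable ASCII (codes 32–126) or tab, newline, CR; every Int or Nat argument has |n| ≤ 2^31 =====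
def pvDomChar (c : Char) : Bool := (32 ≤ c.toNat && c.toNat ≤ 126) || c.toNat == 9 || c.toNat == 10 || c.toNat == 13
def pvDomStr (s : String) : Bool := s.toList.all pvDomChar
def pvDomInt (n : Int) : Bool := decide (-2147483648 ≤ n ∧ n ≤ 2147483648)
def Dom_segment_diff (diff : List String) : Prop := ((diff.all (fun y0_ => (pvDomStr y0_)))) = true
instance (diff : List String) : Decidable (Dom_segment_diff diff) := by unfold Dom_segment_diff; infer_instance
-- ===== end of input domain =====

-- B replaces A's single fan-out pass (setdefault-append per line) by computing the key order
-- first and then one independent filter scan per bucket: objective 'alternative' (same cost).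

-- ===== PORT A =====
-- the keyword_map literal both Pythons contain
def pvKeywordMap : List (String × List String) :=
  [("Dead Code", ["eliminate", "unused", "dce"]),
   ("Inlining", ["inline"]),
   ("Constant Folding", ["fold", "constant"]),
   ("Loop Optimizations", ["loop", "unroll", "ivopt"]),
   ("Strength Reduction", ["strength", "reduction"]),
   ("Reordering", ["reorder", "schedule"])]

def segment_diff (diff : List String) : List (String × List String) :=
  let init : PySem.Dict String (List String) := PySem.Dict.ofList [("All", diff)]
  (diff.foldl (fun d line =>
      let p := pvKeywordMap.foldl
        (fun (p : PySem.Dict String (List String) × Bool) skw =>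
          if skw.2.any (fun kw => PySem.Str.isIn kw (PySem.Str.lower line))
          then ((p.1.modify skw.1 [] (· ++ [line])), true)   -- sections.setdefault(section, []).append(line)
          else p)
        (d, false)
      if p.2 then p.1 else p.1.modify "Misc" [] (· ++ [line]))
    init).items

-- ===== PORT B =====
def pvTags (line : String) : List String :=
  let low := PySem.Str.lower line
  let hits := (pvKeywordMap.filter (fun skw => skw.2.any (fun kw => PySem.Str.isIn kw low))).map (·.1)
  if hits = [] then ["Misc"] else hits

def segment_diff_alt (diff : List String) : List (String × List String) :=
  let tagged := diff.map (fun line => (line, pvTags line))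
  let order := PySem.List.dedup (tagged.flatMap (·.2))   -- dict.fromkeys(...): first-appearance key order
  (order.foldl (fun (d : PySem.Dict String (List String)) s =>
      d.insert s ((tagged.filter (fun p => decide (s ∈ p.2))).map (·.1)))
    (PySem.Dict.ofList [("All", diff)])).items

-- ===== PRECONDITION & SPEC =====
def Spec_segment_diff (diff : List String) (out : List (String × List String)) : Prop := out = segment_diff_alt diff
instance (diff : List String) (out : List (String × List String)) : Decidable (Spec_segment_diff diff out) := by unfold Spec_segment_diff; infer_instance

-- ===== CLAIM (what is proved, stated in full; the proofs are below) =====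
def Claim_equal_segment_diff : Prop := ∀ (diff : List String), Dom_segment_diff diff → Spec_segment_diff diff (segment_diff diff)

-- ===== LEMMAS AND PROOFS =====

-- every tag is one of the seven section names, so never "All"
theorem pvTags_ne_All (line : String) (s : String) (hs : s ∈ pvTags line) : s ≠ "All" := by
  unfold pvTags at hs
  simp only at hs
  split at hs
  · simp at hs; subst hs; decide
  · obtain ⟨skw, hmem, rfl⟩ := List.mem_map.mp hs
    have := List.mem_of_mem_filter hmem
    fin_cases this <;> decide

theorem pvTags_nodup (line : String) : (pvTags line).Nodup := by
  unfold pvTags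
  simp only
  split
  · exact List.nodup_singleton _
  · refine List.Nodup.sublist (List.Sublist.map _ List.filter_sublist) ?_
    decide

-- A's inner keyword loop is a fold of modify-append over the matched section names
theorem inner_loop_eq (km : List (String × List String)) (line : String)
    (d : PySem.Dict String (List String)) (b : Bool) :
    km.foldl
      (fun (p : PySem.Dict String (List String) × Bool) skw =>
        if skw.2.any (fun kw => PySem.Str.isIn kw (PySem.Str.lower line))
        then ((p.1.modify skw.1 [] (· ++ [line])), true)
        else p)
      (d, b)
    = (((km.filter (fun skw => skw.2.any (fun kw => PySem.Str.isIn kw (PySem.Str.lower line)))).map (·.1)).foldl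
         (fun d s => d.modify s [] (· ++ [line])) d,
       b || !(km.filter (fun skw => skw.2.any (fun kw => PySem.Str.isIn kw (PySem.Str.lower line)))).isEmpty) := by
  induction km generalizing d b with
  | nil => simp
  | cons hd tl ih =>
    simp only [List.foldl_cons, List.filter_cons]
    by_cases h : hd.2.any (fun kw => PySem.Str.isIn kw (PySem.Str.lower line)) = true
    · rw [if_pos h, ih, if_pos h]
      simp only [List.map_cons, List.foldl_cons, List.isEmpty_cons, Bool.not_false,
        Bool.or_true, Bool.true_or]
    · rw [if_neg h, ih, if_neg h]

-- A's per-line body is a fold of modify-append over pvTags line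
theorem line_step_eq (line : String) (d : PySem.Dict String (List String)) :
    (let p := pvKeywordMap.foldl
        (fun (p : PySem.Dict String (List String) × Bool) skw =>
          if skw.2.any (fun kw => PySem.Str.isIn kw (PySem.Str.lower line))
          then ((p.1.modify skw.1 [] (· ++ [line])), true)
          else p)
        (d, false)
      if p.2 then p.1 else p.1.modify "Misc" [] (· ++ [line]))
    = (pvTags line).foldl (fun d s => d.modify s [] (· ++ [line])) d := by
  rw [inner_loop_eq]
  simp only [Bool.false_or, pvTags]
  by_cases hf : pvKeywordMap.filter (fun skw => skw.2.any (fun kw => PySem.Str.isIn kw (PySem.Str.lower line))) = []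
  · rw [hf]
    simp only [List.map_nil, List.isEmpty_nil, Bool.not_true, Bool.false_eq_true, if_false,
      if_true, List.foldl_cons, List.foldl_nil]
  · have hie : (pvKeywordMap.filter (fun skw => skw.2.any (fun kw => PySem.Str.isIn kw (PySem.Str.lower line)))).isEmpty = false := by
      simpa [List.isEmpty_iff] using hf
    have hm : (pvKeywordMap.filter (fun skw => skw.2.any (fun kw => PySem.Str.isIn kw (PySem.Str.lower line)))).map (·.1) ≠ [] := by
      simpa using hf
    rw [hie]
    simp only [Bool.not_false, if_true, if_neg hm]

-- a nested fold over per-line pair lists is a fold over the flattened pair list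
theorem foldl_flatMap_pairs {α β γ : Type} (g : α → List β) (step : γ → β → γ)
    (xs : List α) (d : γ) :
    xs.foldl (fun d l => (g l).foldl step d) d = (xs.flatMap g).foldl step d := by
  induction xs generalizing d with
  | nil => rfl
  | cons hd tl ih => simp [List.flatMap_cons, List.foldl_append, ih]

-- the per-line pair lists
def pvLinePairs (line : String) : List (String × String) :=
  (pvTags line).map (fun s => (s, line))

theorem nodup_filter_eq_ite {α : Type} [DecidableEq α] (ts : List α) (s : α) (h : ts.Nodup) :
    ts.filter (· == s) = if s ∈ ts then [s] else [] := by
  induction ts with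
  | nil => simp
  | cons hd tl ih =>
    rw [List.nodup_cons] at h
    obtain ⟨hhd, htl⟩ := h
    rw [List.filter_cons, ih htl]
    by_cases he : hd = s
    · subst he
      simp [hhd]
    · simp [he, Ne.symm he]

-- the s-bucket of the flattened pairs is the filter scan B performs
theorem pairs_filter_eq (diff : List String) (s : String) :
    ((diff.flatMap pvLinePairs).filter (fun p => p.1 == s)).map (·.2)
      = diff.filter (fun line => decide (s ∈ pvTags line)) := by
  induction diff with
  | nil => rfl
  | cons hd tl ih =>
    simp only [List.flatMap_cons, List.filter_append, List.map_append, ih]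
    have hhd : ((pvLinePairs hd).filter (fun p => p.1 == s)).map (·.2)
        = if s ∈ pvTags hd then [hd] else [] := by
      unfold pvLinePairs
      rw [List.filter_map, List.map_map]
      simp only [Function.comp_def]
      rw [nodup_filter_eq_ite (pvTags hd) s (pvTags_nodup hd)]
      by_cases h : s ∈ pvTags hd <;> simp [h]
    rw [hhd, List.filter_cons]
    by_cases h : s ∈ pvTags hd <;> simp [h]

theorem flatMap_tags_eq_map_fst (diff : List String) :
    (diff.flatMap pvLinePairs).map (·.1) = diff.flatMap pvTags := by
  simp [List.map_flatMap, pvLinePairs, List.map_map, Function.comp_def]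

-- B's tagged list, flattened and per-bucket, in terms of diff directly
theorem tagged_flat_eq (diff : List String) :
    (diff.map (fun line => (line, pvTags line))).flatMap (·.2) = diff.flatMap pvTags := by
  rw [List.flatMap_map]

theorem tagged_bucket_eq (diff : List String) (s : String) :
    ((diff.map (fun line => (line, pvTags line))).filter (fun p => decide (s ∈ p.2))).map (·.1)
      = diff.filter (fun line => decide (s ∈ pvTags line)) := by
  rw [List.filter_map, List.map_map]
  simp [Function.comp_def]

-- ===== VERDICT (by name: the statement is the Claim_ definition above) =====
theorem segment_diff_spec : Claim_equal_segment_diff := by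
  intro diff _
  unfold Spec_segment_diff segment_diff segment_diff_alt
  simp only
  -- A's fold is the flattened modify-append fold
  have hA : diff.foldl (fun d line =>
      let p := pvKeywordMap.foldl
        (fun (p : PySem.Dict String (List String) × Bool) skw =>
          if skw.2.any (fun kw => PySem.Str.isIn kw (PySem.Str.lower line))
          then ((p.1.modify skw.1 [] (· ++ [line])), true)
          else p)
        (d, false)
      if p.2 then p.1 else p.1.modify "Misc" [] (· ++ [line]))
      (PySem.Dict.ofList [("All", diff)])
      = (diff.flatMap pvLinePairs).foldl (fun d p => d.modify p.1 [] (· ++ [p.2]))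
          (PySem.Dict.ofList [("All", diff)]) := by
    rw [← foldl_flatMap_pairs pvLinePairs]
    refine PySem.List.foldl_congr_mem _ _ _ _ (fun d line _ => ?_)
    rw [line_step_eq]
    unfold pvLinePairs
    rw [List.foldl_map]
  rw [hA]
  simp only [tagged_flat_eq, tagged_bucket_eq]
  -- characterise both items lists via the init dict's literal items
  have hinit : (PySem.Dict.ofList [("All", diff)]).items = [("All", diff)] := by
    simp [PySem.Dict.ofList, PySem.Dict.update, PySem.Dict.empty, PySem.Dict.insert,
      PySem.Dict.contains]
  have hkeys0 : (PySem.Dict.ofList [("All", diff)]).keys = ["All"] := by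
    simp only [PySem.Dict.keys, hinit, List.map_cons, List.map_nil]
  have hgetD0 : ∀ s : String, (PySem.Dict.ofList [("All", diff)]).getD s []
      = if s = "All" then diff else [] := by
    intro s
    by_cases h : s = "All"
    · subst h
      simp only [PySem.Dict.getD, PySem.Dict.get?, hinit]
      rw [List.find?_cons_of_pos (by simp)]
      simp
    · simp only [PySem.Dict.getD, PySem.Dict.get?, hinit, if_neg h]
      rw [List.find?_cons_of_neg (by simpa using fun hc => h hc.symm), List.find?_nil]
      rfl
  have hcont0 : ∀ s : String, s ≠ "All" →
      (PySem.Dict.ofList [("All", diff)]).contains s = false := by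
    intro s h
    rw [PySem.Dict.contains_eq_decide_mem_keys, hkeys0]
    simp [h]
  have hne : ∀ s ∈ PySem.List.dedup (diff.flatMap pvTags), s ≠ "All" := by
    intro s hs
    rw [PySem.List.dedup_eq_ofList, PySem.Set.mem_ofList] at hs
    obtain ⟨l, _, hsl⟩ := List.mem_flatMap.mp hs
    exact pvTags_ne_All l s hsl
  -- A side: keys of the flattened fold
  have hkeys : ((diff.flatMap pvLinePairs).foldl (fun d p => d.modify p.1 [] (· ++ [p.2]))
      (PySem.Dict.ofList [("All", diff)])).keys
      = "All" :: PySem.List.dedup (diff.flatMap pvTags) := by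
    rw [PySem.Dict.keys_foldl_modify_key (diff.flatMap pvLinePairs) Prod.fst []
      (fun _ p => (· ++ [p.2]))]
    rw [hkeys0, flatMap_tags_eq_map_fst, PySem.Set.update_eq_append_filter,
      PySem.List.dedup_eq_ofList]
    have hf : List.filter (fun y => !PySem.Set.contains ["All"] y)
        (PySem.Set.ofList (diff.flatMap pvTags)) = PySem.Set.ofList (diff.flatMap pvTags) := by
      apply List.filter_eq_self.mpr
      intro y hy
      have hyne : y ≠ "All" := by
        rw [PySem.Set.mem_ofList] at hy
        obtain ⟨l, _, hyl⟩ := List.mem_flatMap.mp hy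
        exact pvTags_ne_All l y hyl
      simp [hyne]
    rw [hf]
    rfl
  have hnodup : ((diff.flatMap pvLinePairs).foldl (fun d p => d.modify p.1 [] (· ++ [p.2]))
      (PySem.Dict.ofList [("All", diff)])).keys.Nodup := by
    apply PySem.Dict.nodup_keys_foldl_modify_key (diff.flatMap pvLinePairs) Prod.fst []
      (fun _ p => (· ++ [p.2]))
    rw [hkeys0]; exact List.nodup_singleton _
  have hgetD : ∀ s : String, ((diff.flatMap pvLinePairs).foldl
      (fun d p => d.modify p.1 [] (· ++ [p.2])) (PySem.Dict.ofList [("All", diff)])).getD s []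
      = (if s = "All" then diff else []) ++ diff.filter (fun line => decide (s ∈ pvTags line)) := by
    intro s
    rw [show (fun (d : PySem.Dict String (List String)) (p : String × String) =>
        d.modify p.1 [] (· ++ [p.2])) = fun d p => d.modify p.1 [] fun x => x ++ [p.2] from rfl]
    rw [PySem.Dict.getD_foldl_modify_append, hgetD0, pairs_filter_eq]
  -- A's items
  rw [PySem.Dict.items_eq_map_keys _ hnodup [], hkeys]
  -- B's items
  have hB : (List.foldl (fun (d : PySem.Dict String (List String)) s =>
        d.insert s (diff.filter (fun line => decide (s ∈ pvTags line))))
      (PySem.Dict.ofList [("All", diff)]) (PySem.List.dedup (diff.flatMap pvTags))).items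
      = [("All", diff)] ++ (PySem.List.dedup (diff.flatMap pvTags)).map
          (fun s => (s, diff.filter (fun line => decide (s ∈ pvTags line)))) := by
    have hfresh := PySem.Dict.items_foldl_insert_fresh (PySem.List.dedup (diff.flatMap pvTags))
      (fun s => s) (fun s => diff.filter (fun line => decide (s ∈ pvTags line)))
      (PySem.Dict.ofList [("All", diff)])
      (fun s hs => hcont0 s (hne s hs))
      (by rw [PySem.List.dedup_eq_ofList, List.map_id_fun']; exact PySem.Set.nodup_ofList (diff.flatMap pvTags))
    simpa [hinit] using hfresh
  rw [hB]
  simp only [List.map_cons, List.singleton_append]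

  congr 1
  · rw [hgetD "All"]
    have hnil : diff.filter (fun line => decide ("All" ∈ pvTags line)) = [] :=
      List.filter_eq_nil_iff.mpr (fun line _ => by
        simpa using fun hc => pvTags_ne_All line "All" hc rfl)
    rw [hnil]
    simp
  · refine List.map_congr_left (fun s hs => ?_)
    rw [hgetD s, if_neg (hne s hs), List.nil_append]
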